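-- pv_equiv track=rewrite | github.com/JamesMCo/Advent-Of-Code | 2017/10/Part1.py | solve
-- ===== SOURCE A (Python) =====
-- def solve(puzzle_input, size=256):
--     def rotate(l, n):
--         t = [x for x in l]
--         if len(t) <= 1:
--             return t
--         if len(t) == 2:
--             return t[1] + t[0]
--         for i in range(n):
--             t = t[1:] + [t[0]]
--         return t
--
--     l = [x for x in range(size)]
--     skip_size = 0
--
--     for i in puzzle_input:
--         if i <= size:
--             l = l[i-1::-1] + l[i:]
--         else:
--             l = l[::-1]
--         l = rotate(l, i + skip_size)
--         skip_size += 1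
--
--     for i in puzzle_input:
--         l = rotate(l, size - i + 1)
--     return l[0] * l[1]
-- ===== SOURCE B (Python) =====
-- def solve(puzzle_input, size=256):
--     # Same pinch-and-rotate round, but each rotation is a single modular
--     # slice (O(len)) instead of rotating one element at a time (O(n*len)).
--     def rot(l, n):
--         if n > 0 and len(l) > 1:
--             n %= len(l)
--             return l[n:] + l[:n]
--         return l
--
--     l = list(range(size))
--     for skip, i in enumerate(puzzle_input):
--         l = l[i-1::-1] + l[i:] if i <= size else list(reversed(l))
--         l = rot(l, i + skip)
--
--     for i in puzzle_input:
--         l = rot(l, size - i + 1)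
--     return l[0] * l[1]
-- ===== Notes on version B (the rewrite author's own statement) =====
-- stated objective: faster
-- what changed: Each rotation is done with one modular slice (n %= len; l[n:]+l[:n]) instead of A's rotate helper that moves one element front-to-back n times, removing the O(n) inner loop per list element.
import Mathlib
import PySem

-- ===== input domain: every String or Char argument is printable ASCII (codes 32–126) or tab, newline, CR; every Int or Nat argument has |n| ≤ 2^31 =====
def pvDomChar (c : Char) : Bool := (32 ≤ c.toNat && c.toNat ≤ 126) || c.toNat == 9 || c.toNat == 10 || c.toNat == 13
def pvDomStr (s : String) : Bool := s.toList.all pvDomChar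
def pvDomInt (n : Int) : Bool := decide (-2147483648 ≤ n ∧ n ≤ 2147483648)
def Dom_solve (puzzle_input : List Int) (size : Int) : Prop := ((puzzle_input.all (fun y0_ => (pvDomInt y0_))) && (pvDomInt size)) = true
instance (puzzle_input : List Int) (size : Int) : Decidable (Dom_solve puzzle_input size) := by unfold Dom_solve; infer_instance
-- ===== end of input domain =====

-- B replaces A's one-element-at-a-time rotation loop by a single modular slice
-- (objective: faster). Equality of the RETURN values is proved on Pre_solve.

-- ===== PORT A =====
-- t[1:] + [t[0]] — one step of A's rotation loop (only run by rotateA on lists of length > 2,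
-- so the pyGetD default is never used there)
def rotlA (t : List Int) : List Int :=
  PySem.List.slice t (some 1) none ++ [PySem.List.pyGetD t 0 0]

-- A's inner helper `rotate(l, n)`.  On a list of length 2 Python returns the INT sum of
-- its two elements; every later list operation on that value raises, so we model that branch as `none`
-- (those executions are excluded by Pre_solve).
def rotateA (l : List Int) (n : Int) : Option (List Int) :=
  let t := l.map (fun x => x)          -- t = [x for x in l]
  if t.length ≤ 1 then some t
  else if t.length = 2 then none
  else some ((PySem.List.pyRange 0 n 1).foldl (fun t _ => rotlA t) t)

-- body of A's first loop; state = (current list or poison, skip_size)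
def stepA (size : Int) (st : Option (List Int) × Int) (i : Int) : Option (List Int) × Int :=
  match st with
  | (none, skip) => (none, skip + 1)
  | (some l, skip) =>
    let l1 := if i ≤ size then
        (PySem.List.slice? l (some (i-1)) none (-1)).getD [] ++ PySem.List.slice l (some i) none
      else (PySem.List.slice? l none none (-1)).getD []      -- l[::-1]; step ≠ 0, never none
    (rotateA l1 (i + skip), skip + 1)

-- body of A's second loop
def stepA2 (size : Int) (l? : Option (List Int)) (i : Int) : Option (List Int) :=
  match l? with
  | none => none
  | some l => rotateA l (size - i + 1)

def solve (puzzle_input : List Int) (size : Int) : Int :=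
  let st := puzzle_input.foldl (stepA size) (some (PySem.List.pyRange 0 size 1), 0)
  let l2 := puzzle_input.foldl (stepA2 size) st.1
  match l2 with
  | some (a :: b :: _) => a * b
  | _ => 0            -- Python raises here (IndexError / TypeError); excluded by Pre_solve

-- ===== PORT B =====
-- B's `rot(l, n)`: one modular slice
def rotB (l : List Int) (n : Int) : List Int :=
  if 0 < n ∧ 1 < l.length then
    PySem.List.slice l (some (PySem.Int.mod n (l.length : Int))) none ++
      PySem.List.slice l none (some (PySem.Int.mod n (l.length : Int)))
  else l

-- body of B's first loop, over enumerate(puzzle_input)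
def stepB (size : Int) (l : List Int) (p : Int × Int) : List Int :=
  let lr := if p.2 ≤ size then
      (PySem.List.slice? l (some (p.2-1)) none (-1)).getD [] ++ PySem.List.slice l (some p.2) none
    else l.reverse                        -- list(reversed(l))
  rotB lr (p.2 + p.1)

-- body of B's second loop
def stepB2 (size : Int) (l : List Int) (i : Int) : List Int :=
  rotB l (size - i + 1)

def solve_alt (puzzle_input : List Int) (size : Int) : Int :=
  let l1 := (PySem.List.enumerate puzzle_input 0).foldl (stepB size) (PySem.List.pyRange 0 size 1)
  let l2 := puzzle_input.foldl (stepB2 size) l1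
  -- the product of the first two elements; under Pre_solve the list has length ≥ 2, so pyGetD is exact
  PySem.List.pyGetD l2 0 0 * PySem.List.pyGetD l2 1 0

-- ===== PRECONDITION & SPEC =====
-- A raises outside Pre_solve: for size ≤ 1 the final product of the first two elements
-- hits a too-short list (IndexError); for size = 2, unless the input is empty or starts
-- with 0 (which doubles the list before any rotation), the first rotate call sees a
-- length-2 list and returns an int, on which the next list operation raises (TypeError).
def Pre_solve (puzzle_input : List Int) (size : Int) : Prop :=
  2 ≤ size ∧ (size = 2 → puzzle_input = [] ∨ puzzle_input.head? = some 0)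
instance (puzzle_input : List Int) (size : Int) : Decidable (Pre_solve puzzle_input size) := by
  unfold Pre_solve; infer_instance

def pvWitness_solve : List Int × Int := ([3, 4, 1, 5], 5)

def Spec_solve (puzzle_input : List Int) (size : Int) (out : Int) : Prop := out = solve_alt puzzle_input size
instance (puzzle_input : List Int) (size : Int) (out : Int) : Decidable (Spec_solve puzzle_input size out) := by unfold Spec_solve; infer_instance

-- ===== CLAIM (what is proved, stated in full; the proofs are below) =====
def Claim_equal_solve : Prop := ∀ (puzzle_input : List Int) (size : Int), Dom_solve puzzle_input size → Pre_solve puzzle_input size → Spec_solve puzzle_input size (solve puzzle_input size)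


-- ===== LEMMAS AND PROOFS =====

theorem rotlA_eq_rotate (t : List Int) (h : t ≠ []) : rotlA t = t.rotate 1 := by
  cases t with
  | nil => simp at h
  | cons a l =>
    simp [rotlA, PySem.List.slice_from_one, PySem.List.pyGetD_zero_cons,
      List.rotate_cons_succ]

theorem foldl_rotl (m : Nat) (t : List Int) (h : t ≠ []) :
    (List.range m).foldl (fun t _ => rotlA t) t = t.rotate m := by
  induction m with
  | zero => simp
  | succ m ih =>
    rw [List.range_succ, List.foldl_append, ih]
    simp only [List.foldl_cons, List.foldl_nil]
    rw [rotlA_eq_rotate _ (by simpa using h), List.rotate_rotate]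

-- A's rotate agrees with B's modular-slice rot on lists of length ≥ 3
theorem rotateA_eq_rotB (l : List Int) (n : Int) (h3 : 3 ≤ l.length) :
    rotateA l n = some (rotB l n) := by
  have hmap : l.map (fun x => x) = l := List.map_id' l
  have hne : l ≠ [] := by rintro rfl; simp at h3
  unfold rotateA
  rw [hmap]
  rw [if_neg (by omega), if_neg (by omega)]
  by_cases hn : 0 < n
  · have hpos : (0:Int) < (l.length : Int) := by exact_mod_cast Nat.lt_of_lt_of_le (by norm_num) h3
    have hk : PySem.Int.mod n (l.length : Int) = n % (l.length : Int) :=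
      PySem.Int.mod_eq_emod_of_pos hpos
    have hk0 : 0 ≤ n % (l.length : Int) := Int.emod_nonneg n (by omega)
    have hklt : n % (l.length : Int) < (l.length : Int) := Int.emod_lt_of_pos n hpos
    have hkn : (n % (l.length : Int)).toNat = n.toNat % l.length := by
      have h1 : ((n.toNat % l.length : Nat) : Int) = n % (l.length : Int) := by
        push_cast
        rw [Int.toNat_of_nonneg (le_of_lt hn)]
      omega
    rw [PySem.List.pyRange_one]
    rw [List.foldl_map]
    rw [foldl_rotl _ _ hne]
    simp only [sub_zero]
    rw [rotB, if_pos ⟨hn, by omega⟩]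
    rw [hk, PySem.List.slice_from _ hk0, PySem.List.slice_to _ hk0, hkn]
    rw [← List.rotate_mod]
    rw [List.rotate_eq_drop_append_take (le_of_lt (Nat.mod_lt _ (by omega)))]
  · rw [PySem.List.pyRange_one_eq_nil (by omega)]
    rw [rotB, if_neg (by tauto)]
    simp

theorem length_rotB (l : List Int) (n : Int) : (rotB l n).length = l.length := by
  unfold rotB
  split_ifs with h
  · have hpos : (0:Int) < (l.length : Int) := by exact_mod_cast Nat.lt_of_lt_of_le (by omega) h.2
    have hk : PySem.Int.mod n (l.length : Int) = n % (l.length : Int) :=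
      PySem.Int.mod_eq_emod_of_pos hpos
    have hk0 : 0 ≤ n % (l.length : Int) := Int.emod_nonneg n (by omega)
    have hklt : n % (l.length : Int) < (l.length : Int) := Int.emod_lt_of_pos n hpos
    rw [hk, PySem.List.slice_from _ hk0, PySem.List.slice_to _ hk0]
    simp
    omega
  · rfl

theorem length_filterMap_of_isSome {α β : Type} (f : α → Option β) (l : List α)
    (h : ∀ a ∈ l, (f a).isSome) : (l.filterMap f).length = l.length := by
  induction l with
  | nil => rfl
  | cons a l ih =>
    have ha := h a (by simp)
    obtain ⟨b, hb⟩ := Option.isSome_iff_exists.mp ha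
    rw [List.filterMap_cons, hb]
    simp [ih (fun x hx => h x (by simp [hx]))]

-- length of the Python slice l[s::-1]
theorem length_revSlice (xs : List Int) (s : Int) :
    ((PySem.List.slice? xs (some s) none (-1)).getD []).length
      = ((if s < 0 then max (s + xs.length) (-1) else min s ((xs.length:Int) - 1)) + 1).toNat := by
  simp only [PySem.List.slice?, PySem.List.sliceIndices]
  norm_num
  set e := (if s < 0 then max (s + ↑xs.length) (-1) else min s ((xs.length:Int) - 1)) with he
  have hub : e ≤ (xs.length : Int) - 1 := by
    rw [he]; split_ifs with h1 <;> omega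
  by_cases hpos : -1 < e
  · rw [if_pos hpos]
    rw [length_filterMap_of_isSome]
    · simp
    · intro a ha
      simp only [List.mem_range] at ha
      have : (e + -(a:Int)).toNat < xs.length := by omega
      simp [List.getElem?_eq_getElem this]
  · rw [if_neg hpos]
    simp
    omega

-- the pinch step l[i-1::-1] + l[i:] never shrinks the list
theorem length_lr (l : List Int) (i : Int) (h3 : 3 ≤ l.length) :
    3 ≤ ((PySem.List.slice? l (some (i-1)) none (-1)).getD [] ++ PySem.List.slice l (some i) none).length := by
  rw [List.length_append, length_revSlice, PySem.List.slice_some_none]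
  simp only [List.length_drop, PySem.List.clampIdx]
  split_ifs <;> omega

-- one step of loop 1: A's body equals B's body, and length ≥ 3 is preserved
theorem step_eq (size i skip : Int) (l : List Int) (h3 : 3 ≤ l.length) :
    stepA size (some l, skip) i = (some (stepB size l (skip, i)), skip + 1)
      ∧ 3 ≤ (stepB size l (skip, i)).length := by
  have hlr : (if i ≤ size then
        (PySem.List.slice? l (some (i-1)) none (-1)).getD [] ++ PySem.List.slice l (some i) none
      else (PySem.List.slice? l none none (-1)).getD [])
      = (if i ≤ size then
        (PySem.List.slice? l (some (i-1)) none (-1)).getD [] ++ PySem.List.slice l (some i) none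
      else l.reverse) := by
    split_ifs with h
    · rfl
    · rw [PySem.List.slice?_none_none_neg_one]; rfl
  have hlen : 3 ≤ ((if i ≤ size then
        (PySem.List.slice? l (some (i-1)) none (-1)).getD [] ++ PySem.List.slice l (some i) none
      else l.reverse)).length := by
    split_ifs with h
    · exact length_lr l i h3
    · simpa using h3
  constructor
  · show ((rotateA _ (i + skip), skip + 1) : Option (List Int) × Int) = _
    rw [hlr]
    rw [rotateA_eq_rotB _ _ hlen]
    rfl
  · show 3 ≤ (rotB _ (i + skip)).length
    rw [length_rotB]
    exact hlen

-- loop 1: A's fold equals B's fold over enumerate, preserving length ≥ 3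
theorem fold1_eq (size : Int) (xs : List Int) : ∀ (l : List Int) (skip : Int), 3 ≤ l.length →
    xs.foldl (stepA size) (some l, skip)
      = (some ((PySem.List.enumerate xs skip).foldl (stepB size) l), skip + xs.length)
    ∧ 3 ≤ ((PySem.List.enumerate xs skip).foldl (stepB size) l).length := by
  induction xs with
  | nil => intro l skip h3; simp [PySem.List.enumerate_nil, h3]
  | cons i xs ih =>
    intro l skip h3
    obtain ⟨hstep, hlen⟩ := step_eq size i skip l h3
    rw [List.foldl_cons, hstep, PySem.List.enumerate_cons, List.foldl_cons]
    obtain ⟨h1, h2⟩ := ih (stepB size l (skip, i)) (skip + 1) hlen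
    refine ⟨?_, h2⟩
    rw [h1, Prod.mk.injEq]
    refine ⟨rfl, by simp; ring⟩

-- loop 2
theorem fold2_eq (size : Int) (xs : List Int) : ∀ (l : List Int), 3 ≤ l.length →
    xs.foldl (stepA2 size) (some l) = some (xs.foldl (stepB2 size) l)
    ∧ 3 ≤ (xs.foldl (stepB2 size) l).length := by
  induction xs with
  | nil => intro l h3; exact ⟨rfl, h3⟩
  | cons i xs ih =>
    intro l h3
    have hstep : stepA2 size (some l) i = some (stepB2 size l i) := by
      show rotateA l (size - i + 1) = _
      rw [rotateA_eq_rotB _ _ h3]; rfl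
    have hlen : 3 ≤ (stepB2 size l i).length := by
      show 3 ≤ (rotB l (size - i + 1)).length
      rw [length_rotB]; exact h3
    rw [List.foldl_cons, hstep, List.foldl_cons]
    exact ih _ hlen

-- the final product: A's match equals B's pyGetD form on lists of length ≥ 2
theorem final_eq (l : List Int) (h2 : 2 ≤ l.length) :
    (match some l with
      | some (a :: b :: _) => a * b
      | _ => (0:Int))
    = PySem.List.pyGetD l 0 0 * PySem.List.pyGetD l 1 0 := by
  match l, h2 with
  | a :: b :: rest, _ =>
    have h1 : PySem.List.pyGetD (a :: b :: rest) 1 0 = b := by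
      have hc : ((1:Nat):Int) = (1:Int) := rfl
      rw [← hc, PySem.List.pyGetD_natCast]; rfl
    rw [PySem.List.pyGetD_zero_cons, h1]

-- ===== VERDICT (by name: the statement is the Claim_ definition above) =====
theorem solve_spec : Claim_equal_solve := by
  intro puzzle_input size _hdom hpre
  obtain ⟨h2, hempty⟩ := hpre
  unfold Spec_solve solve solve_alt
  have hlen0 : (PySem.List.pyRange 0 size 1).length = size.toNat := by
    rw [PySem.List.length_pyRange_one]; simp
  by_cases hnil : puzzle_input = []
  · subst hnil
    simp only [List.foldl_nil, PySem.List.enumerate_nil]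
    exact final_eq _ (by omega)
  · by_cases hs2 : size = 2
    · -- size = 2: the input starts with 0, which doubles the list to length 4 first
      subst hs2
      rcases hempty rfl with h | hhead
      · exact absurd h hnil
      · cases puzzle_input with
        | nil => exact absurd rfl hnil
        | cons a rest =>
        simp only [List.head?_cons, Option.some.injEq] at hhead
        subst hhead
        rw [List.foldl_cons, PySem.List.enumerate_cons, List.foldl_cons]
        have e1 : stepA 2 (some (PySem.List.pyRange 0 2 1), 0) 0 = (some [1,0,0,1], 1) := by decide
        have e2 : stepB 2 (PySem.List.pyRange 0 2 1) (0, 0) = [1,0,0,1] := by decide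
        rw [e1, e2]
        obtain ⟨h1, hlen1⟩ := fold1_eq 2 rest [1,0,0,1] 1 (by decide)
        rw [h1]
        obtain ⟨hf2, hlen2⟩ := fold2_eq 2 (0 :: rest) _ hlen1
        simp only []
        rw [hf2]
        exact final_eq _ (by omega)
    · have hsize3 : 3 ≤ size := by omega
      have h30 : 3 ≤ (PySem.List.pyRange 0 size 1).length := by omega
      obtain ⟨h1, hlen1⟩ := fold1_eq size puzzle_input _ 0 h30
      rw [h1]
      obtain ⟨hf2, hlen2⟩ := fold2_eq size puzzle_input _ hlen1
      simp only []
      rw [hf2]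
      exact final_eq _ (by omega)
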